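-- pv_equiv track=rewrite | github.com/maryiabar/Python_for_DQE | HW4.py | sentence_from_last_words
-- ===== SOURCE A (Python) =====
-- def sentence_from_last_words(text):
--     # step 1: define an empty list
--     last_words = []
--     i = 0
--     # step 2: loop for searching dot (end of the sentence, right border of the word)
--     while i < len(text):
--         if text[i] == '.':
--             j = i-1
--             # step 3: loop for searching the closest whitespace (left border of the word)
--             while j >= 0 and not text[j].isspace():
--                 j -= 1
--             # step 4: add last word to the list
--             last_words.append(text[j+1:i])
--         i += 1
--     # step 5: Join all last words from HW_string_normalized into one sentence
--     sentence = ' '.join(last_words).capitalize() + '.'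
--     return sentence
-- ===== SOURCE B (Python) =====
-- def sentence_from_last_words(text):
--     last_words = []
--     start = 0  # index just after the most recent whitespace
--     for i, ch in enumerate(text):
--         if ch.isspace():
--             start = i + 1
--         elif ch == '.':
--             last_words.append(text[start:i])
--     return ' '.join(last_words).capitalize() + '.'
-- ===== Notes on version B (the rewrite author's own statement) =====
-- stated objective: faster
-- what changed: Replaces the per-dot backward scan for the previous whitespace by a single forward pass that tracks the index just after the most recent whitespace, so each dot's word is sliced in O(1).
import Mathlib
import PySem

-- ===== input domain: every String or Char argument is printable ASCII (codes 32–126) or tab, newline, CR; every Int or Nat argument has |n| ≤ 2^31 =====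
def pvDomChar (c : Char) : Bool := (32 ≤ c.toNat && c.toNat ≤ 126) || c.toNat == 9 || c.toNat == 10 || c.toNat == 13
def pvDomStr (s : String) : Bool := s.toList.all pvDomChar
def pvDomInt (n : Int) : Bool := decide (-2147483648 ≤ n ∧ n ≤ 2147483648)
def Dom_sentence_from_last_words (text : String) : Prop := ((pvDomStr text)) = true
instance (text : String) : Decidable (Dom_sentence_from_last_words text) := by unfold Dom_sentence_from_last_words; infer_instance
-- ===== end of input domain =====

-- B replaces A's per-dot backward whitespace scan by one forward pass tracking the
-- index after the last whitespace (objective: faster, O(n) instead of O(n*w)).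

-- str.capitalize() — first char upper-cased, rest lowered; exact on the ASCII domain
-- (where Python's title-case of a single char is its upper-case).
def pyCapitalize (cs : List Char) : List Char :=
  match cs with
  | [] => []
  | c :: rest => PySem.Chars.upperChar c :: PySem.Chars.lower rest

-- ===== PORT A =====
-- inner while loop of A: from j = i-1 step down while not whitespace; returns j+1
def backA (s : List Char) : Nat → Nat
  | 0 => 0
  | k + 1 => if PySem.Chars.isspace (s.getD k ' ') then k + 1 else backA s k

def sentence_from_last_words (text : String) : String :=
  let s := text.toList
  -- while i < len(text): if text[i] == '.': append text[j+1:i]  (0 ≤ j+1 ≤ i, so the slice is drop/take)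
  let words := (List.range s.length).foldl
    (fun acc i => if s.getD i ' ' == '.'
      then acc ++ [(s.drop (backA s i)).take (i - backA s i)] else acc) []
  String.ofList (pyCapitalize (PySem.Chars.join [' '] words) ++ ['.'])

-- ===== PORT B =====
def sentence_from_last_words_alt (text : String) : String :=
  let s := text.toList
  -- single pass: state = (index after last whitespace, collected words)
  let r := (PySem.List.enumerate s).foldl
    (fun (st : Int × List (List Char)) p =>
      if PySem.Chars.isspace p.2 then (p.1 + 1, st.2)
      else if p.2 == '.' then (st.1, st.2 ++ [(s.drop st.1.toNat).take (p.1.toNat - st.1.toNat)])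
      else st) ((0 : Int), ([] : List (List Char)))
  String.ofList (pyCapitalize (PySem.Chars.join [' '] r.2) ++ ['.'])

-- ===== PRECONDITION & SPEC =====
def Spec_sentence_from_last_words (text : String) (out : String) : Prop := out = sentence_from_last_words_alt text
instance (text : String) (out : String) : Decidable (Spec_sentence_from_last_words text out) := by unfold Spec_sentence_from_last_words; infer_instance

-- ===== CLAIM (what is proved, stated in full; the proofs are below) =====
def Claim_equal_sentence_from_last_words : Prop := ∀ (text : String), Dom_sentence_from_last_words text → Spec_sentence_from_last_words text (sentence_from_last_words text)

-- ===== LEMMAS AND PROOFS =====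

-- abbreviations used only by the proofs
def stepA (s : List Char) (acc : List (List Char)) (i : Nat) : List (List Char) :=
  if s.getD i ' ' == '.' then acc ++ [(s.drop (backA s i)).take (i - backA s i)] else acc

def stepB (s : List Char) (st : Int × List (List Char)) (p : Int × Char) : Int × List (List Char) :=
  if PySem.Chars.isspace p.2 then (p.1 + 1, st.2)
  else if p.2 == '.' then (st.1, st.2 ++ [(s.drop st.1.toNat).take (p.1.toNat - st.1.toNat)])
  else st

lemma enumerate_append (xs ys : List Char) (k : Int) :
    PySem.List.enumerate (xs ++ ys) k
      = PySem.List.enumerate xs k ++ PySem.List.enumerate ys (k + xs.length) := by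
  induction xs generalizing k with
  | nil => simp [PySem.List.enumerate_nil]
  | cons x xs ih =>
      simp [PySem.List.enumerate_cons, ih]
      ring_nf

lemma dot_not_space : PySem.Chars.isspace '.' = false := by decide

lemma invariant (s : List Char) (n : Nat) (hn : n ≤ s.length) :
    (PySem.List.enumerate (s.take n)).foldl (stepB s) ((0 : Int), ([] : List (List Char)))
      = ((backA s n : Int), (List.range n).foldl (stepA s) []) := by
  induction n with
  | zero => simp [PySem.List.enumerate_nil, backA]
  | succ n ih =>
      have hn' : n ≤ s.length := Nat.le_of_succ_le hn
      have hlt : n < s.length := hn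
      have htake : s.take (n + 1) = s.take n ++ [s[n]] :=
        List.take_succ_eq_append_getElem hlt
      rw [htake, enumerate_append, List.foldl_append, ih hn',
        List.range_succ, List.foldl_append]
      have hget : s.getD n ' ' = s[n] := List.getD_eq_getElem s ' ' hlt
      simp only [PySem.List.enumerate_cons, PySem.List.enumerate_nil,
        List.length_take, Nat.min_eq_left hn', List.foldl_cons,
        List.foldl]
      have hget' : s[n]?.getD ' ' = s[n] := by
        simp [List.getElem?_eq_getElem hlt]
      by_cases hsp : PySem.Chars.isspace s[n] = true
      · have hne : s[n] ≠ '.' := by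
          intro hd; rw [hd] at hsp; exact absurd hsp (by decide)
        simp [stepA, stepB, hsp, hget', hne, backA]
      · have hsp' : PySem.Chars.isspace s[n] = false := by
          simpa using hsp
        by_cases hdot : s[n] = '.'
        · simp [stepA, stepB, hget', hdot, backA, dot_not_space]
        · simp [stepA, stepB, hsp', hget', hdot, backA]

-- ===== VERDICT (by name: the statement is the Claim_ definition above) =====
theorem sentence_from_last_words_spec : Claim_equal_sentence_from_last_words := by
  intro text _
  unfold Spec_sentence_from_last_words
  have h := invariant text.toList text.toList.length (le_refl _)
  rw [List.take_length] at h
  exact (congrArg (fun w => String.ofList (pyCapitalize (PySem.Chars.join [' '] w) ++ ['.']))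
    (congrArg Prod.snd h)).symm
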